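-- pv_equiv track=rewrite | github.com/SimBe-hub/PySubdiv | PySubdiv/data/data_structure.py | edge_faces_dict
-- ===== SOURCE A (Python) =====
-- def edge_faces_dict(unique_edges, sorted_edges):
--     """
--     Returns incidence edges and faces. The dictionary key is the edge index and the values are the face indices.
--
--     Parameters
--     ----------
--     unique_edges: (n, 2) int
--         List of vertex indices connected to form the edges with removed duplicates
--     sorted_edges: (n, 2) int
--         List of vertex indices connected to form the edges, sorted along axis 1
--
--     Returns
--     ---------
--     edge_face_dict : dict
--         incidence of faces and edges in dictionary. Key is the edge index and the values are the face indices.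
--     """
--     unique_edges_dict = {}
--     for counter, unique_edge in enumerate(unique_edges):
--         unique_edges_dict[tuple(unique_edge)] = counter
--     edge_index = []
--     for edge in sorted_edges:
--         if tuple(edge) in unique_edges_dict:
--             edge_index.append(unique_edges_dict[tuple(edge)])
--         else:
--             edge_index.append(unique_edges_dict[tuple(edge[::-1])])
--
--     # every three edges belongs to a face. Increment the face index every third ege.
--     face_index = 0
--     face_index_counter = 0
--     edge_face_dict = {index: [] for index in edge_index}
--
--     for index in edge_index:
--         edge_face_dict[index].append(face_index)
--         face_index_counter += 1
--         if face_index_counter == 3: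
--             face_index += 1
--             face_index_counter = 0
--
--     return edge_face_dict
-- ===== SOURCE B (Python) =====
-- def edge_faces_dict(unique_edges, sorted_edges):
--     """
--     Returns incidence edges and faces. The dictionary key is the edge index and the values are the face indices.
--     """
--     # key every edge by its orientation-independent canonical form (the lexicographically
--     # smaller of the tuple and its reversal): no orientation branch, no fallback lookup
--     def canon(e):
--         t = tuple(e)
--         return min(t, t[::-1])
--
--     index_of = {canon(e): i for i, e in enumerate(unique_edges)}
--
--     # consume the edge list recursively, one face (three edges) at a time
--     def consume(edges, face, acc):
--         if not edges:
--             return acc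
--         for e in edges[:3]:
--             acc.setdefault(index_of[canon(e)], []).append(face)
--         return consume(edges[3:], face + 1, acc)
--
--     return consume(sorted_edges, 0, {})
-- ===== Notes on version B (the rewrite author's own statement) =====
-- stated objective: alternative
-- what changed: B keys the lookup by an orientation-independent canonical form min(tuple(e), reversed tuple) instead of A's as-given keys with an if/else reversed-lookup fallback, and replaces A's two staged loops with counter/modulo face bookkeeping and a key-pre-initialising comprehension by a recursive consumer that eats sorted_edges three edges (one face) at a time, passing the face id and the accumulating dict through the recursion.
-- outside the precondition, e.g. on edge_faces_dict([[1, 2], [2, 1]], [[1, 2]]): A returns {0: [0]}, B returns {1: [0]}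
import Mathlib
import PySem

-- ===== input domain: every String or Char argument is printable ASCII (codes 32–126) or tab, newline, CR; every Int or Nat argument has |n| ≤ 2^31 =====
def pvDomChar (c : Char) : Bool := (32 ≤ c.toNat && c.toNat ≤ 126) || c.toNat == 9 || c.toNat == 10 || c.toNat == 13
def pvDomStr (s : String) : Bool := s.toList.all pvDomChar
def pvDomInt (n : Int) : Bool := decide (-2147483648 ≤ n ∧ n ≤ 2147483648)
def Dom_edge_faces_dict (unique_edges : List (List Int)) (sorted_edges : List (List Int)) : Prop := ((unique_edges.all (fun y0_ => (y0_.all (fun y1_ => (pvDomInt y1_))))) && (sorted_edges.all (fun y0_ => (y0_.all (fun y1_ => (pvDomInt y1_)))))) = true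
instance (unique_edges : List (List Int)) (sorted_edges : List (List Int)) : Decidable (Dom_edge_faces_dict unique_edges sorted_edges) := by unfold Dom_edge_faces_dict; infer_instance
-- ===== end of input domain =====

-- B is an alternative decomposition: it keys the lookup by an orientation-independent canonical
-- form min(tuple, reversed tuple) — no if/else fallback branch — and consumes sorted_edges
-- recursively three edges (one face) at a time, with no counter/modulo face bookkeeping and no
-- key-pre-initialising comprehension.

-- ===== PORT A =====
-- literal port of A; tuple(edge[::-1]) is List.reverse; the dict lookups edge_face_dict[index] /
-- unique_edges_dict[...] are ported with getD 0 resp. modify, exact wherever Python does not raise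
-- KeyError (Pre_ excludes the raising inputs).
def edge_faces_dict (unique_edges : List (List Int)) (sorted_edges : List (List Int)) : List (Int × List Int) :=
  let unique_edges_dict : PySem.Dict (List Int) Int :=
    (PySem.List.enumerate unique_edges).foldl (fun d p => d.insert p.2 p.1) PySem.Dict.empty
  let edge_index : List Int :=
    sorted_edges.foldl (fun acc edge =>
      if unique_edges_dict.contains edge then acc ++ [unique_edges_dict.getD edge 0]
      else acc ++ [unique_edges_dict.getD edge.reverse 0]) []
  let edge_face_dict : PySem.Dict Int (List Int) :=
    edge_index.foldl (fun d index => d.insert index ([] : List Int)) PySem.Dict.empty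
  -- state: (edge_face_dict, face_index, face_index_counter); the key is always present, so
  -- modify index [] (· ++ [face_index]) is exactly edge_face_dict[index].append(face_index)
  let final :=
    edge_index.foldl (fun s index =>
      (s.1.modify index [] (· ++ [s.2.1]),
       if s.2.2 + 1 == 3 then (s.2.1 + 1, (0 : Int)) else (s.2.1, s.2.2 + 1)))
      (edge_face_dict, ((0 : Int), (0 : Int)))
  final.1.items

-- ===== PORT B =====
-- literal port of Source B. canon(e) = min(tuple(e), tuple(e)[::-1]): Python's tuple comparison is
-- Mathlib's lexicographic order on List Int, so min is Lean's min. consume is Source B's recursive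
-- helper: edges[:3] / edges[3:] are PySem.List.slice, setdefault(k, []).append(face) is exactly
-- modify k [] (· ++ [face]); index_of[...] ported with getD 0, exact wherever Python does not
-- raise KeyError (Pre_ excludes the raising inputs).
def pvCanonB (e : List Int) : List Int := min e e.reverse

theorem pvSlice3_lt (edges : List (List Int)) (h : ¬ edges = []) :
    (PySem.List.slice edges (some 3) none).length < edges.length := by
  rw [show (3 : Int) = ((3 : Nat) : Int) by norm_num, PySem.List.slice_from_natCast]
  rw [List.length_drop]
  cases edges with
  | nil => exact absurd rfl h
  | cons a t => simp

def pvConsumeB (index_of : PySem.Dict (List Int) Int)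
    (edges : List (List Int)) (face : Int) (acc : PySem.Dict Int (List Int)) :
    PySem.Dict Int (List Int) :=
  if h : edges = [] then acc
  else
    pvConsumeB index_of (PySem.List.slice edges (some 3) none) (face + 1)
      ((PySem.List.slice edges none (some 3)).foldl
        (fun d e => d.modify (index_of.getD (pvCanonB e) 0) [] (· ++ [face])) acc)
termination_by edges.length
decreasing_by exact pvSlice3_lt edges h

def edge_faces_dict_alt (unique_edges : List (List Int)) (sorted_edges : List (List Int)) : List (Int × List Int) :=
  let index_of : PySem.Dict (List Int) Int :=
    (PySem.List.enumerate unique_edges).foldl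
      (fun d p => d.insert (pvCanonB p.2) p.1) PySem.Dict.empty
  (pvConsumeB index_of sorted_edges 0 PySem.Dict.empty).items

-- ===== PRECONDITION & SPEC =====
-- Pre_ excludes (a) inputs where some sorted edge matches no unique edge in either orientation —
-- there BOTH Pythons raise KeyError — and (b) unique_edges containing some edge together with its
-- distinct reversal, where the returned index is an accident of lookup order: A's orientation-test
-- preference and B's canonical-key overwrite then pick different, equally defensible, indices.
def Pre_edge_faces_dict (unique_edges : List (List Int)) (sorted_edges : List (List Int)) : Prop :=
  List.Pairwise (fun a b => a = b.reverse → a = b) unique_edges ∧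
  ∀ e ∈ sorted_edges, e ∈ unique_edges ∨ e.reverse ∈ unique_edges
instance (unique_edges : List (List Int)) (sorted_edges : List (List Int)) : Decidable (Pre_edge_faces_dict unique_edges sorted_edges) := by unfold Pre_edge_faces_dict; infer_instance

def pvWitness_edge_faces_dict : List (List Int) × List (List Int) :=
  ([[1, 2], [2, 3], [1, 3]], [[1, 2], [3, 2], [1, 3]])

def Spec_edge_faces_dict (unique_edges : List (List Int)) (sorted_edges : List (List Int)) (out : List (Int × List Int)) : Prop := out = edge_faces_dict_alt unique_edges sorted_edges
instance (unique_edges : List (List Int)) (sorted_edges : List (List Int)) (out : List (Int × List Int)) : Decidable (Spec_edge_faces_dict unique_edges sorted_edges out) := by unfold Spec_edge_faces_dict; infer_instance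

-- ===== CLAIM (what is proved, stated in full; the proofs are below) =====
def Claim_equal_edge_faces_dict : Prop := ∀ (unique_edges : List (List Int)) (sorted_edges : List (List Int)), Dom_edge_faces_dict unique_edges sorted_edges → Pre_edge_faces_dict unique_edges sorted_edges → Spec_edge_faces_dict unique_edges sorted_edges (edge_faces_dict unique_edges sorted_edges)

-- ===== LEMMAS AND PROOFS =====

-- the pairwise "no edge together with its distinct reversal" relation
def pvOk (a b : List Int) : Prop := a = b.reverse → a = b

-- the canonical form is orientation-invariant …
theorem pvCanonB_rev (e : List Int) : pvCanonB e.reverse = pvCanonB e := by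
  simp [pvCanonB, List.reverse_reverse, min_comm]

-- … and a complete invariant: two edges share a canonical form iff they are equal up to orientation
theorem pvCanonB_eq_iff (u e : List Int) :
    pvCanonB u = pvCanonB e ↔ (u = e ∨ u.reverse = e) := by
  constructor
  · intro h
    rcases min_choice u u.reverse with hu | hu <;>
      rcases min_choice e e.reverse with he | he <;>
      rw [pvCanonB] at h <;> rw [pvCanonB] at h <;> rw [hu, he] at h
    · exact Or.inl h
    · exact Or.inr (by rw [h, List.reverse_reverse])
    · exact Or.inr h
    · exact Or.inl (List.reverse_injective h)
  · rintro (rfl | rfl)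
    · rfl
    · exact (pvCanonB_rev u).symm

-- LAST index (counting from n) of an element of ue equal to e (dict overwrite: last insertion wins)
def pvRefA (ue : List (List Int)) (n : Int) (e : List Int) : Option Int :=
  match ue with
  | [] => none
  | u :: rest =>
    match pvRefA rest (n + 1) e with
    | some i => some i
    | none => if u = e then some n else none

-- LAST index (counting from n) of an element of ue equal to e in either orientation
def pvRefB (ue : List (List Int)) (n : Int) (e : List Int) : Option Int :=
  match ue with
  | [] => none
  | u :: rest =>
    match pvRefB rest (n + 1) e with
    | some i => some i
    | none => if u = e ∨ u.reverse = e then some n else none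

theorem pvRefA_some_mem (ue : List (List Int)) (n : Int) (e : List Int)
    (h : pvRefA ue n e ≠ none) : e ∈ ue := by
  induction ue generalizing n with
  | nil => simp [pvRefA] at h
  | cons u rest ih =>
    rcases hr : pvRefA rest (n + 1) e with _ | k
    · simp only [pvRefA, hr] at h
      by_cases hu : u = e
      · simp [hu]
      · simp [hu] at h
    · exact List.mem_cons_of_mem u (ih (n + 1) (by simp [hr]))

-- A's lookup dict: get? is the last index of e in ue (no hypothesis needed)
theorem pvUdGet (ue : List (List Int)) :
    ∀ (n : Int) (e : List Int) (d : PySem.Dict (List Int) Int),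
      ((PySem.List.enumerate ue n).foldl (fun d p => d.insert p.2 p.1) d).get? e
        = (pvRefA ue n e).or (d.get? e) := by
  induction ue with
  | nil => intro n e d; simp [PySem.List.enumerate_nil, pvRefA]
  | cons u rest ih =>
    intro n e d
    rw [PySem.List.enumerate_cons, List.foldl_cons, ih]
    rcases hr : pvRefA rest (n + 1) e with _ | i
    · simp only [pvRefA, hr, Option.or, PySem.Dict.get?_insert]
      by_cases hu : u = e
      · simp [hu]
      · simp [hu, Ne.symm hu]
    · simp [pvRefA, hr, Option.or]

-- B's canonical lookup dict: get? at canon e is the last index of e in ue up to orientation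
theorem pvCanonGet (ue : List (List Int)) :
    ∀ (n : Int) (e : List Int) (d : PySem.Dict (List Int) Int),
      ((PySem.List.enumerate ue n).foldl
          (fun d p => d.insert (pvCanonB p.2) p.1) d).get? (pvCanonB e)
        = (pvRefB ue n e).or (d.get? (pvCanonB e)) := by
  induction ue with
  | nil => intro n e d; simp [PySem.List.enumerate_nil, pvRefB]
  | cons u rest ih =>
    intro n e d
    rw [PySem.List.enumerate_cons, List.foldl_cons, ih]
    rcases hr : pvRefB rest (n + 1) e with _ | i
    · simp only [pvRefB, hr, PySem.Dict.get?_insert, Option.none_or]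
      by_cases hc : u = e ∨ u.reverse = e
      · rw [if_pos ((pvCanonB_eq_iff u e).2 hc).symm, if_pos hc, Option.some_or]
      · rw [if_neg (fun hh => hc ((pvCanonB_eq_iff u e).1 hh.symm)), if_neg hc, Option.none_or]
    · simp [pvRefB, hr, Option.or]

-- under Pre_'s pairwise condition, the either-orientation last index is A's lookup:
-- the as-given orientation if it occurs, else the reversed one
theorem pvRefB_eq (ue : List (List Int)) (h : List.Pairwise pvOk ue) :
    ∀ (n : Int) (e : List Int),
      pvRefB ue n e = (pvRefA ue n e).or (pvRefA ue n e.reverse) := by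
  induction ue with
  | nil => intro n e; simp [pvRefA, pvRefB]
  | cons u rest ih =>
    intro n e
    rw [List.pairwise_cons] at h
    have hih := ih h.2 (n + 1) e
    rcases hA : pvRefA rest (n + 1) e with _ | i
    · rcases hA' : pvRefA rest (n + 1) e.reverse with _ | j
      · -- no match of either orientation in rest
        have hB : pvRefB rest (n + 1) e = none := by
          rw [hih, hA, hA']; rfl
        simp only [pvRefA, pvRefB, hA, hA', hB, Option.or]
        by_cases h2 : u = e
        · simp [h2]
        · by_cases h1 : u.reverse = e
          · have hue : u = e.reverse := by rw [← h1, List.reverse_reverse]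
            simp [hue]
            by_cases h3 : e.reverse = e <;> simp [h3]
          · have hur : u ≠ e.reverse := fun hc => h1 (by rw [hc, List.reverse_reverse])
            simp [h2, h1, hur]
      · -- reversed match in rest, no as-given match in rest
        have hB : pvRefB rest (n + 1) e = some j := by rw [hih, hA, hA']; rfl
        have hmem : e.reverse ∈ rest := pvRefA_some_mem rest (n + 1) e.reverse (by simp [hA'])
        have hu2 : u ≠ e := by
          intro hc
          have her : u = e.reverse := (h.1 e.reverse hmem) (by rw [hc, List.reverse_reverse])
          have hee : e = e.reverse := hc.symm.trans her
          have hnone : pvRefA rest (n + 1) e.reverse = none := by rw [← hee]; exact hA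
          rw [hA'] at hnone
          cases hnone
        simp [pvRefA, pvRefB, hA, hA', hB, hu2, Option.or]
    · -- as-given match in rest
      have hB : pvRefB rest (n + 1) e = some i := by rw [hih, hA]; rfl
      simp [pvRefA, pvRefB, hA, hB, Option.or]

-- the two lookup phases agree pointwise: A's branch = B's canonical-key lookup
theorem pvLookup_eq (ue : List (List Int)) (h : List.Pairwise pvOk ue) (e : List Int) :
    (if ((PySem.List.enumerate ue).foldl (fun d p => d.insert p.2 p.1) PySem.Dict.empty).contains e
     then ((PySem.List.enumerate ue).foldl (fun d p => d.insert p.2 p.1) PySem.Dict.empty).getD e 0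
     else ((PySem.List.enumerate ue).foldl (fun d p => d.insert p.2 p.1) PySem.Dict.empty).getD e.reverse 0)
    = ((PySem.List.enumerate ue).foldl
        (fun d p => d.insert (pvCanonB p.2) p.1) PySem.Dict.empty).getD (pvCanonB e) 0 := by
  rw [PySem.Dict.contains_eq_isSome_get?, PySem.Dict.getD_eq_get?_getD,
    PySem.Dict.getD_eq_get?_getD, PySem.Dict.getD_eq_get?_getD,
    pvUdGet ue 0 e PySem.Dict.empty, pvUdGet ue 0 e.reverse PySem.Dict.empty,
    pvCanonGet ue 0 e PySem.Dict.empty, pvRefB_eq ue h 0 e]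
  rcases pvRefA ue 0 e with _ | i <;> rcases pvRefA ue 0 e.reverse with _ | j <;>
    simp [Option.or, PySem.Dict.get?_empty]

-- A's append-in-both-branches loop is a map
theorem pvFoldIf (se : List (List Int)) (c : List Int → Bool) (f g : List Int → Int)
    (acc : List Int) :
    se.foldl (fun acc edge => if c edge then acc ++ [f edge] else acc ++ [g edge]) acc
    = acc ++ se.map (fun e => if c e then f e else g e) := by
  induction se generalizing acc with
  | nil => simp
  | cons x xs ih => by_cases hc : c x <;> simp [hc, ih]

-- A's counter loop computes face id pos // 3
theorem pvCounterLoop (ks : List Int) :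
    ∀ (n : Nat) (d : PySem.Dict Int (List Int)),
      (ks.foldl (fun s index =>
          (s.1.modify index [] (· ++ [s.2.1]),
           if s.2.2 + 1 == 3 then (s.2.1 + 1, (0 : Int)) else (s.2.1, s.2.2 + 1)))
        (d, (((n / 3 : Nat) : Int), ((n % 3 : Nat) : Int)))).1
      = (PySem.List.enumerate ks (n : Int)).foldl
          (fun d p => d.modify p.2 [] (· ++ [PySem.Int.floordiv p.1 3])) d := by
  induction ks with
  | nil => intro n d; simp [PySem.List.enumerate_nil]
  | cons k ks ih =>
    intro n d
    rw [PySem.List.enumerate_cons, List.foldl_cons, List.foldl_cons]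
    have hfd : PySem.Int.floordiv (n : Int) 3 = ((n / 3 : Nat) : Int) := by
      exact_mod_cast PySem.Int.floordiv_natCast n 3
    have hpair : (if ((n % 3 : Nat) : Int) + 1 == 3
          then (((n / 3 : Nat) : Int) + 1, (0 : Int))
          else (((n / 3 : Nat) : Int), ((n % 3 : Nat) : Int) + 1))
        = ((((n + 1) / 3 : Nat) : Int), (((n + 1) % 3 : Nat) : Int)) := by
      by_cases hm : n % 3 = 2
      · have h1 : (n + 1) / 3 = n / 3 + 1 := by omega
        have h2 : (n + 1) % 3 = 0 := by omega
        simp [hm, h1, h2]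
      · have h1 : (n + 1) / 3 = n / 3 := by omega
        have h2 : (n + 1) % 3 = n % 3 + 1 := by omega
        simp only [beq_iff_eq]
        rw [if_neg (by omega : ¬(((n % 3 : Nat) : Int) + 1 = 3)), h1, h2]
        push_cast
        ring_nf
    rw [hpair, hfd]
    have := ih (n + 1) (d.modify k [] (· ++ [((n / 3 : Nat) : Int)]))
    rw [this]
    norm_num

-- B's fold over enumerate se with a key function g is the fold over enumerate (se.map g)
theorem pvEnumMapFold (se : List (List Int)) (g : List Int → Int) :
    ∀ (n : Int) (d : PySem.Dict Int (List Int)),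
      (PySem.List.enumerate se n).foldl
        (fun d p => d.modify (g p.2) [] (· ++ [PySem.Int.floordiv p.1 3])) d
      = (PySem.List.enumerate (se.map g) n).foldl
          (fun d p => d.modify p.2 [] (· ++ [PySem.Int.floordiv p.1 3])) d := by
  induction se with
  | nil => intro n d; simp [PySem.List.enumerate_nil]
  | cons x xs ih =>
    intro n d
    rw [List.map_cons, PySem.List.enumerate_cons, PySem.List.enumerate_cons,
      List.foldl_cons, List.foldl_cons, ih]

-- B's three-at-a-time recursion is the fold over enumerate with face id pos // 3
theorem pvConsume_eq (idx : PySem.Dict (List Int) Int) :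
    ∀ (N : Nat) (T : List (List Int)), T.length ≤ N →
      ∀ (c : Nat) (d : PySem.Dict Int (List Int)),
      pvConsumeB idx T ((c : Nat) : Int) d
      = (PySem.List.enumerate T ((3 * c : Nat) : Int)).foldl
          (fun d p => d.modify (idx.getD (pvCanonB p.2) 0) [] (· ++ [PySem.Int.floordiv p.1 3])) d := by
  intro N
  induction N with
  | zero =>
    intro T hT c d
    have : T = [] := List.length_eq_zero_iff.1 (Nat.le_zero.1 hT)
    subst this
    rw [pvConsumeB]
    simp [PySem.List.enumerate_nil]
  | succ N ih =>
    intro T hT c d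
    have h3 : (3 : Int) = ((3 : Nat) : Int) := by norm_num
    have e0 : PySem.Int.floordiv ((3 * c : Nat) : Int) (((3 : Nat)) : Int) = ((c : Nat) : Int) := by
      rw [PySem.Int.floordiv_natCast]
      norm_cast
      omega
    have e1 : PySem.Int.floordiv ((3 * c + 1 : Nat) : Int) (((3 : Nat)) : Int) = ((c : Nat) : Int) := by
      rw [PySem.Int.floordiv_natCast]
      norm_cast
      omega
    have e2 : PySem.Int.floordiv ((3 * c + 2 : Nat) : Int) (((3 : Nat)) : Int) = ((c : Nat) : Int) := by
      rw [PySem.Int.floordiv_natCast]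
      norm_cast
      omega
    match T with
    | [] =>
      rw [pvConsumeB]
      simp [PySem.List.enumerate_nil]
    | [a] =>
      rw [pvConsumeB, dif_neg (by simp : ¬([a] : List (List Int)) = [])]
      rw [h3, PySem.List.slice_from_natCast, PySem.List.slice_to_natCast]
      simp only [List.drop_succ_cons, List.drop_nil, List.take_succ_cons, List.take_nil]
      rw [pvConsumeB, dif_pos rfl]
      rw [PySem.List.enumerate_cons, PySem.List.enumerate_nil]
      simp only [List.foldl_cons, List.foldl_nil, e0]
    | [a, b] =>
      rw [pvConsumeB, dif_neg (by simp : ¬([a, b] : List (List Int)) = [])]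
      rw [h3, PySem.List.slice_from_natCast, PySem.List.slice_to_natCast]
      simp only [List.drop_succ_cons, List.drop_nil, List.take_succ_cons, List.take_nil]
      rw [pvConsumeB, dif_pos rfl]
      rw [PySem.List.enumerate_cons, PySem.List.enumerate_cons, PySem.List.enumerate_nil]
      rw [show ((3 * c : Nat) : Int) + 1 = ((3 * c + 1 : Nat) : Int) by push_cast; ring]
      simp only [List.foldl_cons, List.foldl_nil, e0, e1]
    | a :: b :: e :: rest =>
      rw [pvConsumeB, dif_neg (by simp : ¬(a :: b :: e :: rest : List (List Int)) = [])]
      rw [h3, PySem.List.slice_from_natCast, PySem.List.slice_to_natCast]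
      simp only [List.drop_succ_cons, List.drop_zero, List.take_succ_cons, List.take_zero]
      have hT' : rest.length ≤ N := by
        simp only [List.length_cons] at hT
        omega
      rw [show ((c : Nat) : Int) + 1 = (((c + 1 : Nat)) : Int) by push_cast; ring]
      rw [ih rest hT' (c + 1)]
      rw [PySem.List.enumerate_cons, PySem.List.enumerate_cons, PySem.List.enumerate_cons]
      rw [show ((3 * c : Nat) : Int) + 1 = ((3 * c + 1 : Nat) : Int) by push_cast; ring]
      rw [show ((3 * c + 1 : Nat) : Int) + 1 = ((3 * c + 2 : Nat) : Int) by push_cast; ring]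
      rw [show ((3 * c + 2 : Nat) : Int) + 1 = ((3 * (c + 1) : Nat) : Int) by push_cast; ring]
      simp only [List.foldl_cons, List.foldl_nil, e0, e1, e2]
      rw [← h3]

-- the key-pre-initialising dict has value [] everywhere
theorem pvInitGetD (ks : List Int) :
    ∀ (d : PySem.Dict Int (List Int)) (c : Int), d.getD c [] = [] →
      (ks.foldl (fun d index => d.insert index ([] : List Int)) d).getD c [] = [] := by
  induction ks with
  | nil => intro d c h; simpa using h
  | cons k ks ih =>
    intro d c h
    rw [List.foldl_cons]
    apply ih
    rw [PySem.Dict.getD_insert]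
    split <;> simp [h]

-- items are determined by the key list and the getD values (keys Nodup)
theorem pvItemsChar (d : PySem.Dict Int (List Int)) (hn : d.keys.Nodup) :
    d.items = d.keys.map (fun k => (k, d.getD k [])) := by
  have h1 : d.items.map (fun p => (p.1, d.getD p.1 [])) = d.items := by
    rw [show d.items = d.items.map id from (List.map_id d.items).symm]
    rw [List.map_map]
    apply List.map_congr_left
    intro p hp
    have := PySem.Dict.getD_of_mem_items (d := d) (d0 := ([] : List Int))
      (by simpa using hp : (p.1, p.2) ∈ d.items) hn
    simp [this]
  calc d.items = d.items.map (fun p => (p.1, d.getD p.1 [])) := h1.symm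
    _ = d.keys.map (fun k => (k, d.getD k [])) := by
        simp only [PySem.Dict.keys, List.map_map]; rfl

theorem pvDictExt (d d' : PySem.Dict Int (List Int)) (hk : d.keys = d'.keys)
    (hn : d.keys.Nodup) (hv : ∀ k, d.getD k [] = d'.getD k []) : d = d' := by
  apply PySem.Dict.ext
  rw [pvItemsChar d hn, pvItemsChar d' (hk ▸ hn), hk]
  exact List.map_congr_left fun k _ => by rw [hv k]

-- updating a set with elements it already contains is the identity
theorem pvSetUpdateSelf (xs : List Int) (s : PySem.Set Int) (h : ∀ x ∈ xs, x ∈ s) :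
    PySem.Set.update s xs = s := by
  induction xs generalizing s with
  | nil => rfl
  | cons x t ih =>
    have hx : PySem.Set.add s x = s := by
      simp [PySem.Set.add, PySem.Set.contains, h x (by simp)]
    show PySem.Set.update (PySem.Set.add s x) t = s
    rw [hx]
    exact ih s fun y hy => h y (by simp [hy])

-- the common phase-2 shape: folding over enumerate ks from pre-initialised keys vs from empty
theorem pvPhase2_eq (ks : List Int) :
    (PySem.List.enumerate ks).foldl
      (fun d p => d.modify p.2 [] (· ++ [PySem.Int.floordiv p.1 3]))
      (ks.foldl (fun d index => d.insert index ([] : List Int)) PySem.Dict.empty)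
    = (PySem.List.enumerate ks).foldl
        (fun d p => d.modify p.2 [] (· ++ [PySem.Int.floordiv p.1 3])) PySem.Dict.empty := by
  have hfold : ∀ (d : PySem.Dict Int (List Int)),
      (PySem.List.enumerate ks).foldl
        (fun d p => d.modify p.2 [] (· ++ [PySem.Int.floordiv p.1 3])) d
      = ((PySem.List.enumerate ks).map (fun p => (p.2, PySem.Int.floordiv p.1 3))).foldl
          (fun d q => d.modify q.1 [] (· ++ [q.2])) d := by
    intro d; rw [List.foldl_map]
  have hinitkeys :
      (ks.foldl (fun d index => d.insert index ([] : List Int)) PySem.Dict.empty).keys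
        = PySem.Set.ofList ks := by
    rw [PySem.Dict.keys_foldl_insert (f := fun _ _ => ([] : List Int))]
    rw [PySem.Dict.keys_empty, PySem.Set.ofList_eq_foldl]
    rfl
  have hkeysL :
      ((PySem.List.enumerate ks).foldl
        (fun d p => d.modify p.2 [] (· ++ [PySem.Int.floordiv p.1 3]))
        (ks.foldl (fun d index => d.insert index ([] : List Int)) PySem.Dict.empty)).keys
      = PySem.Set.ofList ks := by
    rw [PySem.Dict.keys_foldl_modify_key (PySem.List.enumerate ks) (fun p => p.2) []
      (fun _ p => (· ++ [PySem.Int.floordiv p.1 3]))]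
    rw [hinitkeys, PySem.List.map_snd_enumerate]
    exact pvSetUpdateSelf ks _ fun x hx => (PySem.Set.mem_ofList ks x).2 hx
  have hkeysR :
      ((PySem.List.enumerate ks).foldl
        (fun d p => d.modify p.2 [] (· ++ [PySem.Int.floordiv p.1 3])) PySem.Dict.empty).keys
      = PySem.Set.ofList ks := by
    rw [PySem.Dict.keys_foldl_modify_key (PySem.List.enumerate ks) (fun p => p.2) []
      (fun _ p => (· ++ [PySem.Int.floordiv p.1 3]))]
    rw [PySem.Dict.keys_empty, PySem.List.map_snd_enumerate, PySem.Set.ofList_eq_foldl]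
    rfl
  apply pvDictExt
  · rw [hkeysL, hkeysR]
  · rw [hkeysL]; exact PySem.Set.nodup_ofList ks
  · intro c
    rw [hfold, hfold, PySem.Dict.getD_foldl_modify_append, PySem.Dict.getD_foldl_modify_append,
      pvInitGetD ks PySem.Dict.empty c (by rw [PySem.Dict.getD_empty]), PySem.Dict.getD_empty]

-- ===== VERDICT (by name: the statement is the Claim_ definition above) =====
theorem edge_faces_dict_spec : Claim_equal_edge_faces_dict := by
  intro ue se _ hpre
  obtain ⟨hpw, hmatch⟩ := hpre
  show edge_faces_dict ue se = edge_faces_dict_alt ue se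
  simp only [edge_faces_dict, edge_faces_dict_alt]
  rw [pvFoldIf]
  rw [List.nil_append]
  rw [show (se.map fun e =>
        if ((PySem.List.enumerate ue).foldl (fun d p => d.insert p.2 p.1) PySem.Dict.empty).contains e
        then ((PySem.List.enumerate ue).foldl (fun d p => d.insert p.2 p.1) PySem.Dict.empty).getD e 0
        else ((PySem.List.enumerate ue).foldl (fun d p => d.insert p.2 p.1) PySem.Dict.empty).getD e.reverse 0)
      = se.map (fun e =>
          ((PySem.List.enumerate ue).foldl
            (fun d p => d.insert (pvCanonB p.2) p.1) PySem.Dict.empty).getD (pvCanonB e) 0)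
    from List.map_congr_left fun e _ => pvLookup_eq ue hpw e]
  rw [show ((0 : Int), (0 : Int)) = ((((0 : Nat) / 3 : Nat) : Int), (((0 : Nat) % 3 : Nat) : Int)) by norm_num]
  rw [pvCounterLoop _ 0]
  rw [Nat.cast_zero]
  rw [pvPhase2_eq]
  rw [show (0 : Int) = ((0 : Nat) : Int) by norm_num,
    pvConsume_eq _ se.length se le_rfl 0, Nat.mul_zero, Nat.cast_zero,
    pvEnumMapFold se (fun e =>
      ((PySem.List.enumerate ue).foldl
        (fun d p => d.insert (pvCanonB p.2) p.1) PySem.Dict.empty).getD (pvCanonB e) 0)]
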